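-- pv_equiv track=rewrite | github.com/Akshitkumar23/CivixAI | scripts/enrich_csv.py | determine_occupation_eligibility
-- ===== SOURCE A (Python) =====
-- def determine_occupation_eligibility(category, name):
--     n = name.lower()
--     c = category.lower()
--     occ = []
--     if c == 'agriculture' or any(k in n for k in ['farmer','kisan','agricultural','farm','krishi','fisheries','matsya','horticulture']):
--         occ.append('farmer')
--     if c == 'education' or any(k in n for k in ['student','scholarship','fellowship','apprentice','intern','nats','doctoral']):
--         occ.append('student')
--     if c == 'employment' or any(k in n for k in ['skill','job','employment','labour','worker','nrega','kaushal']):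
--         occ.append('unemployed')
--     if any(k in n for k in ['msme','entrepreneur','business','startup','self employ','proprietor','artisan','prism','acabc']):
--         occ.append('self_employed')
--     if any(k in n for k in ['sportsperson','athlete','sport','khelo']):
--         occ.append('athlete')
--     return ','.join(list(dict.fromkeys(occ))) if occ else 'all'
-- ===== SOURCE B (Python) =====
-- # Substring matching done the other way round: slide a window over the name and
-- # look each window up in a keyword->tag dictionary, instead of scanning the name
-- # once per keyword.  Category handled by a category->tag dictionary.
--
-- KW = {
--     'farmer': 'farmer', 'kisan': 'farmer', 'agricultural': 'farmer', 'farm': 'farmer',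
--     'krishi': 'farmer', 'fisheries': 'farmer', 'matsya': 'farmer', 'horticulture': 'farmer',
--     'student': 'student', 'scholarship': 'student', 'fellowship': 'student',
--     'apprentice': 'student', 'intern': 'student', 'nats': 'student', 'doctoral': 'student',
--     'skill': 'unemployed', 'job': 'unemployed', 'employment': 'unemployed',
--     'labour': 'unemployed', 'worker': 'unemployed', 'nrega': 'unemployed', 'kaushal': 'unemployed',
--     'msme': 'self_employed', 'entrepreneur': 'self_employed', 'business': 'self_employed',
--     'startup': 'self_employed', 'self employ': 'self_employed', 'proprietor': 'self_employed',
--     'artisan': 'self_employed', 'prism': 'self_employed', 'acabc': 'self_employed',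
--     'sportsperson': 'athlete', 'athlete': 'athlete', 'sport': 'athlete', 'khelo': 'athlete',
-- }
-- CAT = {'agriculture': 'farmer', 'education': 'student', 'employment': 'unemployed'}
-- ORDER = ['farmer', 'student', 'unemployed', 'self_employed', 'athlete']
-- LENS = sorted({len(k) for k in KW})
--
--
-- def _hits(c, n):
--     hits = set()
--     t = CAT.get(c)
--     if t is not None:
--         hits.add(t)
--     for i in range(len(n)):
--         for l in LENS:
--             t = KW.get(n[i:i + l])
--             if t is not None:
--                 hits.add(t)
--     return hits
--
--
-- def determine_occupation_eligibility(category, name):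
--     n = name.lower()
--     c = category.lower()
--     hits = _hits(c, n)
--     tags = [t for t in ORDER if t in hits]
--     return ','.join(tags) if tags else 'all'
-- ===== Notes on version B (the rewrite author's own statement) =====
-- stated objective: alternative
-- what changed: Inverts the substring search: instead of scanning the name once per keyword (35 'k in n' scans) plus five hardcoded if/append blocks, B slides a window over the lowered name once and looks each window up in a keyword->tag dictionary, resolves the category through a category->tag dictionary, collects matched tags in a set, and emits them in a fixed priority order.
import Mathlib
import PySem

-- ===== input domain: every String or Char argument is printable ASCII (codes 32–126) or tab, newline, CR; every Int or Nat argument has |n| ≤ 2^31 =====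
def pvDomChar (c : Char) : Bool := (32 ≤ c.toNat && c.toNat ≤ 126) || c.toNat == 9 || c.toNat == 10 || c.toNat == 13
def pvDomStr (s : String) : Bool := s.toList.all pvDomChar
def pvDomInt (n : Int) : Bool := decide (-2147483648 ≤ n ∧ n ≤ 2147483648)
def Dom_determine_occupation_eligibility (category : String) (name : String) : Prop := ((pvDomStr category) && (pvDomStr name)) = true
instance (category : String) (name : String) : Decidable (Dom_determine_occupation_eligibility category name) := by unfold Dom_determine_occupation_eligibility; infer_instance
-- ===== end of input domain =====

-- B inverts the substring search: a sliding window over the lowered name looked up in a keyword->tag dictionary (and a category->tag dictionary), tags emitted in fixed priority order (alternative algorithm, similar cost).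


-- ===== PORT A =====
def determine_occupation_eligibility (category : String) (name : String) : String :=
  let n := PySem.Str.lower name
  let c := PySem.Str.lower category
  let occ : List String := []
  let occ := if c == "agriculture" || (["farmer","kisan","agricultural","farm","krishi","fisheries","matsya","horticulture"].any (fun k => PySem.Str.isIn k n)) then occ ++ ["farmer"] else occ
  let occ := if c == "education" || (["student","scholarship","fellowship","apprentice","intern","nats","doctoral"].any (fun k => PySem.Str.isIn k n)) then occ ++ ["student"] else occ
  let occ := if c == "employment" || (["skill","job","employment","labour","worker","nrega","kaushal"].any (fun k => PySem.Str.isIn k n)) then occ ++ ["unemployed"] else occ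
  let occ := if ["msme","entrepreneur","business","startup","self employ","proprietor","artisan","prism","acabc"].any (fun k => PySem.Str.isIn k n) then occ ++ ["self_employed"] else occ
  let occ := if ["sportsperson","athlete","sport","khelo"].any (fun k => PySem.Str.isIn k n) then occ ++ ["athlete"] else occ
  if occ.isEmpty then "all" else PySem.Str.join "," (PySem.List.dedup occ)

-- ===== PORT B =====
-- keyword -> tag dictionary (KW in Source B)
def pvKW : PySem.Dict String String := PySem.Dict.ofList
  [ ("farmer","farmer"), ("kisan","farmer"), ("agricultural","farmer"), ("farm","farmer"),
    ("krishi","farmer"), ("fisheries","farmer"), ("matsya","farmer"), ("horticulture","farmer"),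
    ("student","student"), ("scholarship","student"), ("fellowship","student"),
    ("apprentice","student"), ("intern","student"), ("nats","student"), ("doctoral","student"),
    ("skill","unemployed"), ("job","unemployed"), ("employment","unemployed"),
    ("labour","unemployed"), ("worker","unemployed"), ("nrega","unemployed"), ("kaushal","unemployed"),
    ("msme","self_employed"), ("entrepreneur","self_employed"), ("business","self_employed"),
    ("startup","self_employed"), ("self employ","self_employed"), ("proprietor","self_employed"),
    ("artisan","self_employed"), ("prism","self_employed"), ("acabc","self_employed"),
    ("sportsperson","athlete"), ("athlete","athlete"), ("sport","athlete"), ("khelo","athlete") ]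

-- category -> tag dictionary (CAT in Source B)
def pvCAT : PySem.Dict String String := PySem.Dict.ofList
  [ ("agriculture","farmer"), ("education","student"), ("employment","unemployed") ]

-- fixed output order (ORDER in Source B)
def pvORDER : List String := ["farmer", "student", "unemployed", "self_employed", "athlete"]

-- LENS = sorted({len(k) for k in KW})
def pvLENS : List Int := PySem.List.sorted (PySem.Set.ofList (pvKW.keys.map PySem.Str.len)) id false

-- _hits(c, n) in Source B: the set of matched tags
def pvHits (c : String) (n : String) : PySem.Set String :=
  let hits : PySem.Set String :=
    match pvCAT.get? c with
    | some t => PySem.Set.add PySem.Set.empty t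
    | none => PySem.Set.empty
  (PySem.List.pyRange 0 (PySem.Str.len n) 1).foldl (fun s i =>
    pvLENS.foldl (fun s l =>
      match pvKW.get? (PySem.Str.slice n (some i) (some (i + l))) with
      | some t => PySem.Set.add s t
      | none => s) s) hits

def determine_occupation_eligibility_alt (category : String) (name : String) : String :=
  let n := PySem.Str.lower name
  let c := PySem.Str.lower category
  let hits := pvHits c n
  let tags := pvORDER.filter (fun t => PySem.Set.contains hits t)
  if tags.isEmpty then "all" else PySem.Str.join "," tags

-- ===== PRECONDITION & SPEC =====
def Spec_determine_occupation_eligibility (category : String) (name : String) (out : String) : Prop := out = determine_occupation_eligibility_alt category name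
instance (category : String) (name : String) (out : String) : Decidable (Spec_determine_occupation_eligibility category name out) := by unfold Spec_determine_occupation_eligibility; infer_instance

-- ===== CLAIM =====
def Claim_equal_determine_occupation_eligibility : Prop := ∀ (category : String) (name : String), Dom_determine_occupation_eligibility category name → Spec_determine_occupation_eligibility category name (determine_occupation_eligibility category name)

-- ===== LEMMAS AND PROOFS =====

set_option maxRecDepth 16384 in
theorem pvKW_nodup : pvKW.keys.Nodup := by decide

theorem pvCAT_items : pvCAT.items = [ ("agriculture","farmer"), ("education","student"), ("employment","unemployed") ] := by decide

set_option maxRecDepth 16384 in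
theorem pvLENS_eq : pvLENS = [3,4,5,6,7,8,9,10,11,12] := by decide

-- membership in a fold that conditionally adds dictionary hits
theorem pv_mem_optAdd_foldl {α : Type} (g : α → Option String) (l : List α) (s : List String) (y : String) :
    y ∈ l.foldl (fun s x => match g x with | some t => PySem.Set.add s t | none => s) s ↔
      y ∈ s ∨ ∃ x ∈ l, g x = some y := by
  induction l generalizing s with
  | nil => simp
  | cons hd tl ih =>
    simp only [List.foldl_cons]
    cases hgd : g hd with
    | none => rw [ih]; simp [hgd]
    | some t => rw [ih]; simp [hgd, PySem.Set.mem_add]; tauto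

-- the same through the nested position/length loops
theorem pv_mem_foldl2 (g : Int → Int → Option String) (li ll : List Int) (s : List String) (y : String) :
    y ∈ li.foldl (fun s i => ll.foldl (fun s l =>
        match g i l with | some t => PySem.Set.add s t | none => s) s) s ↔
      y ∈ s ∨ ∃ i ∈ li, ∃ l ∈ ll, g i l = some y := by
  induction li generalizing s with
  | nil => simp
  | cons hd tl ih =>
    simp only [List.foldl_cons]
    rw [ih, pv_mem_optAdd_foldl]
    simp only [List.mem_cons]
    constructor
    · rintro ((h | ⟨x, hx, hg⟩) | ⟨i, hi, h⟩)
      · exact Or.inl h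
      · exact Or.inr ⟨hd, Or.inl rfl, x, hx, hg⟩
      · exact Or.inr ⟨i, Or.inr hi, h⟩
    · rintro (h | ⟨i, (rfl | hi), h⟩)
      · exact Or.inl (Or.inl h)
      · exact Or.inl (Or.inr h)
      · exact Or.inr ⟨i, hi, h⟩

-- the initial set from the category lookup
theorem pv_mem_match (o : Option String) (y : String) :
    y ∈ (match o with | some t => PySem.Set.add PySem.Set.empty t | none => PySem.Set.empty) ↔ o = some y := by
  cases o <;> simp [PySem.Set.empty, eq_comm]

theorem pv_mem_pvHits (c n y : String) :
    y ∈ pvHits c n ↔ pvCAT.get? c = some y ∨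
      ∃ i ∈ PySem.List.pyRange 0 (PySem.Str.len n) 1, ∃ l ∈ pvLENS,
        pvKW.get? (PySem.Str.slice n (some i) (some (i + l))) = some y := by
  unfold pvHits
  rw [pv_mem_foldl2, pv_mem_match]

theorem pv_get?_KW (w t : String) : pvKW.get? w = some t ↔ (w, t) ∈ pvKW.items :=
  PySem.Dict.get?_eq_some_iff_mem_items _ _ _ pvKW_nodup

-- a window that equals a keyword exists iff the keyword is a substring of n
theorem pv_window_iff (n kw : String) (hw : kw.toList ≠ [])
    (hlen : ((kw.toList.length : Int)) ∈ pvLENS) :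
    (∃ i ∈ PySem.List.pyRange 0 (PySem.Str.len n) 1, ∃ l ∈ pvLENS,
        PySem.Str.slice n (some i) (some (i + l)) = kw) ↔ PySem.Str.isIn kw n = true := by
  rw [PySem.Str.isIn_eq, ← PySem.Chars.exists_prefix_drop_iff_isIn]
  constructor
  · rintro ⟨i, hi, l, hl, hsl⟩
    rw [PySem.List.mem_pyRange_one] at hi
    have hl3 : 3 ≤ l := by
      rw [pvLENS_eq] at hl; simp at hl; omega
    have hts := congrArg String.toList hsl
    rw [PySem.Str.toList_slice] at hts
    unfold PySem.Chars.slice at hts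
    rw [PySem.List.slice_toNat _ hi.1 (by omega)] at hts
    exact ⟨i.toNat, hts ▸ List.take_prefix _ _⟩
  · rintro ⟨j, hj⟩
    have hjlt : j < n.toList.length := by
      by_contra h
      rw [List.drop_eq_nil_of_le (by omega)] at hj
      exact hw (List.prefix_nil.mp hj)
    refine ⟨(j : Int), ?_, (kw.toList.length : Int), hlen, ?_⟩
    · rw [PySem.List.mem_pyRange_one, PySem.Str.len_eq]
      constructor <;> [positivity; exact_mod_cast hjlt]
    · apply String.toList_inj.mp
      rw [PySem.Str.toList_slice]
      unfold PySem.Chars.slice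
      rw [PySem.List.slice_toNat _ (by positivity) (by positivity)]
      have hlen' : ((j : Int) + (kw.toList.length : Int)).toNat - ((j : Int)).toNat = kw.toList.length := by omega
      have hj' : ((j : Int)).toNat = j := Int.toNat_natCast j
      rw [hlen', hj', (List.prefix_iff_eq_take.mp hj).symm]

-- generic per-tag bridge between B's window hits and A's keyword scans
theorem pv_hits_any (n : String) (kws : List String) (t : String)
    (h1 : ∀ p ∈ pvKW.items, p.2 = t → p.1 ∈ kws)
    (h2 : ∀ w ∈ kws, (w, t) ∈ pvKW.items)
    (h3 : ∀ w ∈ kws, w.toList ≠ [] ∧ ((w.toList.length : Int)) ∈ pvLENS) :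
    (∃ i ∈ PySem.List.pyRange 0 (PySem.Str.len n) 1, ∃ l ∈ pvLENS,
        pvKW.get? (PySem.Str.slice n (some i) (some (i + l))) = some t) ↔
      kws.any (fun k => PySem.Str.isIn k n) = true := by
  rw [List.any_eq_true]
  constructor
  · rintro ⟨i, hi, l, hl, hget⟩
    have hmem := pv_get?_KW _ t |>.mp hget
    have hk := h1 _ hmem rfl
    refine ⟨_, hk, ?_⟩
    obtain ⟨hne, hln⟩ := h3 _ hk
    exact (pv_window_iff n _ hne hln).mp ⟨i, hi, l, hl, rfl⟩
  · rintro ⟨w, hw, hin⟩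
    obtain ⟨hne, hln⟩ := h3 _ hw
    obtain ⟨i, hi, l, hl, hsl⟩ := (pv_window_iff n w hne hln).mpr hin
    exact ⟨i, hi, l, hl, hsl ▸ (pv_get?_KW w t).mpr (h2 _ hw)⟩

-- category lookups, one per tag
theorem pv_cat_farmer (c : String) : pvCAT.get? c = some "farmer" ↔ c = "agriculture" := by
  rw [PySem.Dict.get?_eq_some_iff_mem_items _ _ _ (by decide), pvCAT_items]
  simp [Prod.ext_iff]

theorem pv_cat_student (c : String) : pvCAT.get? c = some "student" ↔ c = "education" := by
  rw [PySem.Dict.get?_eq_some_iff_mem_items _ _ _ (by decide), pvCAT_items]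
  simp [Prod.ext_iff]

theorem pv_cat_unemployed (c : String) : pvCAT.get? c = some "unemployed" ↔ c = "employment" := by
  rw [PySem.Dict.get?_eq_some_iff_mem_items _ _ _ (by decide), pvCAT_items]
  simp [Prod.ext_iff]

theorem pv_cat_none (c : String) (t : String) (h : t = "self_employed" ∨ t = "athlete") :
    ¬ pvCAT.get? c = some t := by
  rw [PySem.Dict.get?_eq_some_iff_mem_items _ _ _ (by decide), pvCAT_items]
  rcases h with rfl | rfl <;> simp [Prod.ext_iff]

-- the five per-tag boolean equalities
set_option maxRecDepth 16384 in
theorem pv_q_farmer (c n : String) :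
    PySem.Set.contains (pvHits c n) "farmer" =
      (c == "agriculture" || (["farmer","kisan","agricultural","farm","krishi","fisheries","matsya","horticulture"].any (fun k => PySem.Str.isIn k n))) := by
  rw [Bool.eq_iff_iff, PySem.Set.contains_iff, pv_mem_pvHits, pv_cat_farmer,
    pv_hits_any n ["farmer","kisan","agricultural","farm","krishi","fisheries","matsya","horticulture"] "farmer" (by decide) (by decide) (by decide)]
  simp

set_option maxRecDepth 16384 in
theorem pv_q_student (c n : String) :
    PySem.Set.contains (pvHits c n) "student" =
      (c == "education" || (["student","scholarship","fellowship","apprentice","intern","nats","doctoral"].any (fun k => PySem.Str.isIn k n))) := by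
  rw [Bool.eq_iff_iff, PySem.Set.contains_iff, pv_mem_pvHits, pv_cat_student,
    pv_hits_any n ["student","scholarship","fellowship","apprentice","intern","nats","doctoral"] "student" (by decide) (by decide) (by decide)]
  simp

set_option maxRecDepth 16384 in
theorem pv_q_unemployed (c n : String) :
    PySem.Set.contains (pvHits c n) "unemployed" =
      (c == "employment" || (["skill","job","employment","labour","worker","nrega","kaushal"].any (fun k => PySem.Str.isIn k n))) := by
  rw [Bool.eq_iff_iff, PySem.Set.contains_iff, pv_mem_pvHits, pv_cat_unemployed,
    pv_hits_any n ["skill","job","employment","labour","worker","nrega","kaushal"] "unemployed" (by decide) (by decide) (by decide)]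
  simp

set_option maxRecDepth 16384 in
theorem pv_q_self (c n : String) :
    PySem.Set.contains (pvHits c n) "self_employed" =
      (["msme","entrepreneur","business","startup","self employ","proprietor","artisan","prism","acabc"].any (fun k => PySem.Str.isIn k n)) := by
  rw [Bool.eq_iff_iff, PySem.Set.contains_iff, pv_mem_pvHits,
    pv_hits_any n ["msme","entrepreneur","business","startup","self employ","proprietor","artisan","prism","acabc"] "self_employed" (by decide) (by decide) (by decide)]
  simp [pv_cat_none c _ (Or.inl rfl)]

set_option maxRecDepth 16384 in
theorem pv_q_athlete (c n : String) :
    PySem.Set.contains (pvHits c n) "athlete" =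
      (["sportsperson","athlete","sport","khelo"].any (fun k => PySem.Str.isIn k n)) := by
  rw [Bool.eq_iff_iff, PySem.Set.contains_iff, pv_mem_pvHits,
    pv_hits_any n ["sportsperson","athlete","sport","khelo"] "athlete" (by decide) (by decide) (by decide)]
  simp [pv_cat_none c _ (Or.inr rfl)]

-- A's and B's output assembly from the same five booleans
def pvJoinA (b1 b2 b3 b4 b5 : Bool) : String :=
  let occ : List String := []
  let occ := if b1 then occ ++ ["farmer"] else occ
  let occ := if b2 then occ ++ ["student"] else occ
  let occ := if b3 then occ ++ ["unemployed"] else occ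
  let occ := if b4 then occ ++ ["self_employed"] else occ
  let occ := if b5 then occ ++ ["athlete"] else occ
  if occ.isEmpty then "all" else PySem.Str.join "," (PySem.List.dedup occ)

def pvJoinB (b1 b2 b3 b4 b5 : Bool) : String :=
  let tags := pvORDER.filter (fun t =>
    if t == "farmer" then b1 else if t == "student" then b2 else if t == "unemployed" then b3
    else if t == "self_employed" then b4 else b5)
  if tags.isEmpty then "all" else PySem.Str.join "," tags

theorem pvCombine (b1 b2 b3 b4 b5 : Bool) : pvJoinA b1 b2 b3 b4 b5 = pvJoinB b1 b2 b3 b4 b5 := by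
  cases b1 <;> cases b2 <;> cases b3 <;> cases b4 <;> cases b5 <;> decide

-- ===== VERDICT =====
set_option maxHeartbeats 1000000 in
theorem determine_occupation_eligibility_spec : Claim_equal_determine_occupation_eligibility := by
  intro category name _
  show determine_occupation_eligibility category name = determine_occupation_eligibility_alt category name
  have hA : determine_occupation_eligibility category name =
      pvJoinA
        ((PySem.Str.lower category) == "agriculture" || (["farmer","kisan","agricultural","farm","krishi","fisheries","matsya","horticulture"].any (fun k => PySem.Str.isIn k (PySem.Str.lower name))))
        ((PySem.Str.lower category) == "education" || (["student","scholarship","fellowship","apprentice","intern","nats","doctoral"].any (fun k => PySem.Str.isIn k (PySem.Str.lower name))))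
        ((PySem.Str.lower category) == "employment" || (["skill","job","employment","labour","worker","nrega","kaushal"].any (fun k => PySem.Str.isIn k (PySem.Str.lower name))))
        (["msme","entrepreneur","business","startup","self employ","proprietor","artisan","prism","acabc"].any (fun k => PySem.Str.isIn k (PySem.Str.lower name)))
        (["sportsperson","athlete","sport","khelo"].any (fun k => PySem.Str.isIn k (PySem.Str.lower name))) := rfl
  have hfil : (pvORDER.filter (fun t => PySem.Set.contains (pvHits (PySem.Str.lower category) (PySem.Str.lower name)) t))
      = pvORDER.filter (fun t =>
          if t == "farmer" then PySem.Set.contains (pvHits (PySem.Str.lower category) (PySem.Str.lower name)) "farmer"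
          else if t == "student" then PySem.Set.contains (pvHits (PySem.Str.lower category) (PySem.Str.lower name)) "student"
          else if t == "unemployed" then PySem.Set.contains (pvHits (PySem.Str.lower category) (PySem.Str.lower name)) "unemployed"
          else if t == "self_employed" then PySem.Set.contains (pvHits (PySem.Str.lower category) (PySem.Str.lower name)) "self_employed"
          else PySem.Set.contains (pvHits (PySem.Str.lower category) (PySem.Str.lower name)) "athlete") := by
    apply List.filter_congr
    intro t ht
    fin_cases ht <;> rfl
  have hB : determine_occupation_eligibility_alt category name =
      pvJoinB
        (PySem.Set.contains (pvHits (PySem.Str.lower category) (PySem.Str.lower name)) "farmer")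
        (PySem.Set.contains (pvHits (PySem.Str.lower category) (PySem.Str.lower name)) "student")
        (PySem.Set.contains (pvHits (PySem.Str.lower category) (PySem.Str.lower name)) "unemployed")
        (PySem.Set.contains (pvHits (PySem.Str.lower category) (PySem.Str.lower name)) "self_employed")
        (PySem.Set.contains (pvHits (PySem.Str.lower category) (PySem.Str.lower name)) "athlete") := by
    show (let n := PySem.Str.lower name
          let c := PySem.Str.lower category
          let hits := pvHits c n
          let tags := pvORDER.filter (fun t => PySem.Set.contains hits t)
          if tags.isEmpty then "all" else PySem.Str.join "," tags) = _
    simp only []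
    rw [hfil]
    rfl
  rw [hA, hB, pv_q_farmer, pv_q_student, pv_q_unemployed, pv_q_self, pv_q_athlete, pvCombine]
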